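-- pv_equiv track=rewrite | github.com/geochicas/8m-global-mapper | src/parse/html_parser.py | _looks_like_logo
-- ===== SOURCE A (Python) =====
-- def _looks_like_logo(url: str) -> bool:
--     u = (url or "").lower()
--     bad = [
--         "logo", "brand", "icon", "favicon", "sprite",
--         "footer", "header", "navbar", "nav", "menu",
--         "badge", "avatar", "profile", "placeholder",
--         "tracking", "pixel", "spacer",
--     ]
--     return any(b in u for b in bad)
-- ===== SOURCE B (Python) =====
-- _PATTERNS = (
--     "logo", "brand", "icon", "favicon", "sprite",
--     "footer", "header", "navbar", "nav", "menu",
--     "badge", "avatar", "profile", "placeholder",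
--     "tracking", "pixel", "spacer",
-- )
--
--
-- def _looks_like_logo(url: str) -> bool:
--     u = (url or "").lower()
--     for i in range(len(u)):
--         if any(u.startswith(p, i) for p in _PATTERNS):
--             return True
--     return False
-- ===== Notes on version B (the rewrite author's own statement) =====
-- stated objective: alternative
-- what changed: Replaced the 17 independent per-pattern full-string substring searches with a single left-to-right scan that, at each position of the lowered string, checks whether any of the 17 literals starts there.
import Mathlib
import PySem

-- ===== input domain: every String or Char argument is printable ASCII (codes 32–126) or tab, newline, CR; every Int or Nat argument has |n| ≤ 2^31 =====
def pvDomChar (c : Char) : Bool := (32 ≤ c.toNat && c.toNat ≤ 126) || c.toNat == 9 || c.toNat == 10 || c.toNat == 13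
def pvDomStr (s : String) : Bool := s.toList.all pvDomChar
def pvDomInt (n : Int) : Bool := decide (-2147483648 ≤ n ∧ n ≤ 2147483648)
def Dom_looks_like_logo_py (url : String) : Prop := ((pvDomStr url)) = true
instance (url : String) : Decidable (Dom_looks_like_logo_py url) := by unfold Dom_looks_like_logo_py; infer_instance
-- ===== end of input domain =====

-- B replaces A's per-pattern full-string substring searches with ONE left-to-right scan
-- checking each position for any pattern; same return value (objective: alternative).

-- ===== PORT A =====
def logoBadList : List String :=
  ["logo", "brand", "icon", "favicon", "sprite",
   "footer", "header", "navbar", "nav", "menu",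
   "badge", "avatar", "profile", "placeholder",
   "tracking", "pixel", "spacer"]

def looks_like_logo_py (url : String) : Bool :=
  -- u = (url or "").lower()   ('url or ""' is url itself when url is a str; "" stays "")
  let u := PySem.Str.lower (if url = "" then "" else url)
  -- any(b in u for b in bad)
  logoBadList.any (fun b => PySem.Str.isIn b u)

-- ===== PORT B =====
def logoPatterns : List String :=
  ["logo", "brand", "icon", "favicon", "sprite",
   "footer", "header", "navbar", "nav", "menu",
   "badge", "avatar", "profile", "placeholder",
   "tracking", "pixel", "spacer"]

-- the scan: for each position (suffix) of u, does some pattern start here?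
def logoScan : List Char → Bool
  | [] => false
  | c :: rest =>
      logoPatterns.any (fun p => p.toList.isPrefixOf (c :: rest)) || logoScan rest

def looks_like_logo_py_alt (url : String) : Bool :=
  logoScan (PySem.Chars.lower url.toList)

-- ===== PRECONDITION & SPEC =====
def Spec_looks_like_logo_py (url : String) (out : Bool) : Prop := out = looks_like_logo_py_alt url
instance (url : String) (out : Bool) : Decidable (Spec_looks_like_logo_py url out) := by unfold Spec_looks_like_logo_py; infer_instance

-- ===== CLAIM (what is proved, stated in full; the proofs are below) =====
def Claim_equal_looks_like_logo_py : Prop := ∀ (url : String), Dom_looks_like_logo_py url → Spec_looks_like_logo_py url (looks_like_logo_py url)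

-- ===== LEMMAS AND PROOFS =====

-- the scan finds a pattern iff some pattern is an infix
theorem logoScan_iff (s : List Char) :
    logoScan s = true ↔ ∃ p ∈ logoPatterns, p.toList <:+: s := by
  induction s with
  | nil =>
      simp only [logoScan, List.infix_nil, Bool.false_eq_true, false_iff]
      decide
  | cons c rest ih =>
      simp only [logoScan, Bool.or_eq_true, List.any_eq_true,
        List.isPrefixOf_iff_prefix, ih, List.infix_cons_iff]
      constructor
      · rintro (⟨p, hp, h⟩ | ⟨p, hp, h⟩)
        · exact ⟨p, hp, Or.inl h⟩
        · exact ⟨p, hp, Or.inr h⟩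
      · rintro ⟨p, hp, h | h⟩
        · exact Or.inl ⟨p, hp, h⟩
        · exact Or.inr ⟨p, hp, h⟩

-- ===== VERDICT (by name: the statement is the Claim_ definition above) =====
theorem looks_like_logo_py_spec : Claim_equal_looks_like_logo_py := by
  intro url _
  unfold Spec_looks_like_logo_py looks_like_logo_py looks_like_logo_py_alt
  have hor : (if url = "" then "" else url) = url := by
    split_ifs with h
    · exact h.symm
    · rfl
  rw [hor, Bool.eq_iff_iff, logoScan_iff, List.any_eq_true]
  constructor
  · rintro ⟨b, hb, h⟩
    rw [PySem.Str.isIn_iff_infix, PySem.Str.toList_lower] at h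
    exact ⟨b, hb, h⟩
  · rintro ⟨p, hp, h⟩
    refine ⟨p, hp, ?_⟩
    rw [PySem.Str.isIn_iff_infix, PySem.Str.toList_lower]
    exact h
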